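-- pv_equiv track=rewrite | github.com/HaeKang/2023-coding-study | week5/[BOJ] 9342.염색체.실버3/YB.py | check
-- ===== SOURCE A (Python) =====
-- def check(now):
--     for ch in ['A', 'F', 'C']:
--         if now and now[0] == ch:
--             idx=len(now)-1
--             for i in range(len(now)):
--                 if now[i] != ch:
--                     idx = i
--                     break
--             now = now[idx:]
--         else:
--             return False
--
--     if not now or (len(now) == 1 and now[0] in ['A', 'B','C','D','E','F']):
--         return True
--
--     else:
--         return False
-- ===== SOURCE B (Python) =====
-- def check(now):
--     # single-pass DFA: 0 start, 1 in A-run, 2 in F-run, 3 in C-run, 4 after one trailing A-F char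
--     state = 0
--     for ch in now:
--         if state == 0:
--             state = 1 if ch == 'A' else -1
--         elif state == 1:
--             state = 1 if ch == 'A' else (2 if ch == 'F' else -1)
--         elif state == 2:
--             state = 2 if ch == 'F' else (3 if ch == 'C' else -1)
--         elif state == 3:
--             if ch == 'C':
--                 state = 3
--             elif ch in 'ABDEF':
--                 state = 4
--             else:
--                 state = -1
--         else:
--             state = -1
--         if state == -1:
--             return False
--     return state == 3 or state == 4
-- ===== Notes on version B (the rewrite author's own statement) =====
-- stated objective: alternative
-- what changed: Replaced A's three-phase strip-and-restart scanner (per-letter prefix search with slicing and a len-1 fallback index) by a single left-to-right pass of an explicit five-state finite automaton.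
import Mathlib
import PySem

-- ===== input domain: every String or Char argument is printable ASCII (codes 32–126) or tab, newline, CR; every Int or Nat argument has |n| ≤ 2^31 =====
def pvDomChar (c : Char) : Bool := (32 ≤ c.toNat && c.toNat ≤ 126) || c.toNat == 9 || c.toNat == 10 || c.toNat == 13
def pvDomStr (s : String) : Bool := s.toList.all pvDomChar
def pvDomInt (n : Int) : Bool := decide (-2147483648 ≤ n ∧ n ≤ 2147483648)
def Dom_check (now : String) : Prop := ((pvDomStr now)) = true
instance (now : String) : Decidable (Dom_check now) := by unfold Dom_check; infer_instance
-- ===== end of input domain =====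

-- B replaces A's three-phase strip-and-restart scanner by one left-to-right pass of a
-- five-state automaton (objective: alternative single-pass algorithm, same cost class).

-- ===== PORT A =====
-- idx = len(now)-1; for i in range(len(now)): if now[i] != ch: idx = i; break
def pyStripIdx (ch : Char) (now : List Char) : Nat :=
  match now.findIdx? (fun c => c != ch) with
  | some i => i
  | none => now.length - 1

-- the for-loop over ['A','F','C'] with its early `return False`
def pyPhases : List Char → List Char → Option (List Char)
  | [], now => some now
  | ch :: chs, now =>
      if now.head? == some ch then pyPhases chs (now.drop (pyStripIdx ch now))
      else none

-- final: `if not now or (len(now) == 1 and now[0] in ['A','B','C','D','E','F'])`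
def pyFinal (nw : List Char) : Bool :=
  nw.isEmpty || (nw.length == 1 && ['A','B','C','D','E','F'].contains (nw.headD ' '))

def check (now : String) : Bool :=
  match pyPhases ['A', 'F', 'C'] now.toList with
  | some nw => pyFinal nw
  | none => false

-- ===== PORT B =====
-- states: 0 start, 1 in A-run, 2 in F-run, 3 in C-run, 4 after one trailing A–F char, -1 dead
def dfaStep (state : Int) (ch : Char) : Int :=
  if state == 0 then (if ch == 'A' then 1 else -1)
  else if state == 1 then (if ch == 'A' then 1 else if ch == 'F' then 2 else -1)
  else if state == 2 then (if ch == 'F' then 2 else if ch == 'C' then 3 else -1)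
  else if state == 3 then
    (if ch == 'C' then 3 else if ['A', 'B', 'D', 'E', 'F'].contains ch then 4 else -1)
  else -1

-- the for-loop with its early `return False`, then `state == 3 or state == 4`
def dfaGo (state : Int) : List Char → Bool
  | [] => state == 3 || state == 4
  | ch :: rest =>
      let s := dfaStep state ch
      if s == -1 then false else dfaGo s rest

def check_alt (now : String) : Bool := dfaGo 0 now.toList

-- ===== PRECONDITION & SPEC =====
def Spec_check (now : String) (out : Bool) : Prop := out = check_alt now
instance (now : String) (out : Bool) : Decidable (Spec_check now out) := by unfold Spec_check; infer_instance

-- ===== CLAIM (what is proved, stated in full; the proofs are below) =====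
def Claim_equal_check : Prop := ∀ (now : String), Dom_check now → Spec_check now (check now)

-- ===== LEMMAS AND PROOFS =====

-- what survives after the leading C-run may be empty or one char of A–F
def tailOK : List Char → Bool
  | [] => true
  | [x] => ['A', 'B', 'C', 'D', 'E', 'F'].contains x
  | _ => false

def contC (l : List Char) : Bool :=
  match l with
  | c :: r => c == 'C' && dfaGo 3 r
  | _ => false

def contF (l : List Char) : Bool :=
  match l with
  | c :: r => c == 'F' && dfaGo 2 r
  | _ => false

theorem strip_cons (ch : Char) : ∀ r : List Char,
    (ch :: r).drop (pyStripIdx ch (ch :: r)) =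
      (if r.dropWhile (· == ch) = [] then [ch] else r.dropWhile (· == ch)) := by
  intro r
  induction r with
  | nil => simp [pyStripIdx, List.findIdx?_cons]
  | cons c2 r2 ih =>
    by_cases h : c2 = ch
    · subst h
      have hidx : pyStripIdx c2 (c2 :: c2 :: r2) = pyStripIdx c2 (c2 :: r2) + 1 := by
        unfold pyStripIdx
        rw [List.findIdx?_cons]
        simp only [bne_self_eq_false]
        cases hfi : List.findIdx? (fun c => c != c2) (c2 :: r2) with
        | none =>
          simp [List.length]
        | some i =>
          simp
      rw [hidx, List.drop_succ_cons, ih]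
      simp
    · have hb : (c2 == ch) = false := by simp [h]
      have : pyStripIdx ch (ch :: c2 :: r2) = 1 := by
        unfold pyStripIdx
        rw [List.findIdx?_cons]
        simp only [bne_self_eq_false]
        rw [List.findIdx?_cons]
        have : (c2 != ch) = true := by simp [h]
        simp [this]
      rw [this]
      simp [hb]

theorem g3 : ∀ l : List Char, dfaGo 3 l = tailOK (l.dropWhile (· == 'C')) := by
  intro l
  induction l with
  | nil => rfl
  | cons c r ih =>
    by_cases hc : c = 'C'
    · subst hc
      simpa [dfaGo, dfaStep, List.dropWhile_cons] using ih
    · have hb : (c == 'C') = false := by simp [hc]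
      by_cases hm : c = 'A' ∨ c = 'B' ∨ c = 'D' ∨ c = 'E' ∨ c = 'F'
      · rcases hm with h | h | h | h | h <;> subst h <;>
          cases r with
          | nil => decide
          | cons c2 r2 => simp [dfaGo, dfaStep, tailOK, List.dropWhile_cons]
      · rw [not_or, not_or, not_or, not_or] at hm
        obtain ⟨h1, h2, h3, h4, h5⟩ := hm
        cases r with
        | nil => simp [dfaGo, dfaStep, tailOK, List.dropWhile_cons, hb, hc, h1, h2, h3, h4, h5]
        | cons c2 r2 => simp [dfaGo, dfaStep, tailOK, List.dropWhile_cons, hb, h1, h2, h3, h4, h5]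

theorem g2 : ∀ l : List Char, dfaGo 2 l = contC (l.dropWhile (· == 'F')) := by
  intro l
  induction l with
  | nil => rfl
  | cons c r ih =>
    by_cases hc : c = 'F'
    · subst hc
      simpa [dfaGo, dfaStep, List.dropWhile_cons] using ih
    · have hb : (c == 'F') = false := by simp [hc]
      by_cases hc2 : c = 'C'
      · subst hc2
        simp [dfaGo, dfaStep, contC]
      · have hb2 : (c == 'C') = false := by simp [hc2]
        simp [dfaGo, dfaStep, hb, hb2, contC]

theorem g1 : ∀ l : List Char, dfaGo 1 l = contF (l.dropWhile (· == 'A')) := by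
  intro l
  induction l with
  | nil => rfl
  | cons c r ih =>
    by_cases hc : c = 'A'
    · subst hc
      simpa [dfaGo, dfaStep, List.dropWhile_cons] using ih
    · have hb : (c == 'A') = false := by simp [hc]
      by_cases hc2 : c = 'F'
      · subst hc2
        simp [dfaGo, dfaStep, contF]
      · have hb2 : (c == 'F') = false := by simp [hc2]
        simp [dfaGo, dfaStep, hb, hb2, contF]

theorem mainL : ∀ l : List Char,
    (match pyPhases ['A', 'F', 'C'] l with
     | some nw => pyFinal nw
     | none => false) = dfaGo 0 l := by
  intro l
  cases l with
  | nil => rfl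
  | cons c r =>
    by_cases hc : c = 'A'
    · subst hc
      rw [pyPhases]
      simp only [List.head?_cons, beq_self_eq_true, if_true]
      rw [dfaGo]
      simp only [dfaStep, beq_self_eq_true, if_true]
      rw [show ((1 : Int) == -1) = false by decide]
      simp only [g1, Bool.false_eq_true]
      rw [strip_cons]
      cases hdw : r.dropWhile (· == 'A') with
      | nil => simp [pyPhases, contF]
      | cons c2 r2 =>
        rw [if_neg (List.cons_ne_nil _ _)]
        by_cases hc2 : c2 = 'F'
        · subst hc2
          rw [pyPhases]
          simp only [List.head?_cons, beq_self_eq_true, if_true]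
          rw [strip_cons]
          simp only [contF, beq_self_eq_true, Bool.true_and, g2]
          cases hdw2 : r2.dropWhile (· == 'F') with
          | nil => simp [pyPhases, contC]
          | cons c3 r3 =>
            rw [if_neg (List.cons_ne_nil _ _)]
            by_cases hc3 : c3 = 'C'
            · subst hc3
              rw [pyPhases]
              simp only [List.head?_cons, beq_self_eq_true, if_true]
              rw [strip_cons]
              simp only [contC, beq_self_eq_true, Bool.true_and, g3]
              cases hdw3 : r3.dropWhile (· == 'C') with
              | nil => simp [pyPhases, pyFinal, tailOK]
              | cons c4 r4 =>
                rw [if_neg (List.cons_ne_nil _ _)]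
                simp only [pyPhases]
                cases r4 with
                | nil => simp [pyFinal, tailOK]
                | cons c5 r5 => simp [pyFinal, tailOK]
            · have hb3 : (c3 == 'C') = false := by simp [hc3]
              simp [pyPhases, contC, hb3]
        · have hb2 : (c2 == 'F') = false := by simp [hc2]
          simp [pyPhases, contF, hb2]
    · have hb : (c == 'A') = false := by simp [hc]
      simp [pyPhases, dfaGo, dfaStep, hb]

-- ===== VERDICT (by name: the statement is the Claim_ definition above) =====
theorem check_spec : Claim_equal_check := by
  intro now _
  unfold Spec_check check check_alt
  exact mainL now.toList
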